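-- pv_equiv track=rewrite | github.com/Mihai780/LFA-Project | Examen/Ex3/Game.py | make_room_lists
-- ===== SOURCE A (Python) =====
-- def make_room_lists(Rooms,Transitions):
--     Room_inventory={}
--     for room in Rooms:
--         Room_inventory[room]=[]
--         #we check every left part of the transition and if the the current room is in there and there is a
--         #form of take, for example take <item_name> we add the item that should be there through the transitions
--         #we have in the "Configurare_LA"
--         for transition in Transitions:
--             if transition[0]==room and 'take' in transition[1]:
--                 Room_inventory[room].append(Transitions[transition][0])
--     return Room_inventory
-- ===== SOURCE B (Python) =====
-- def make_room_lists(Rooms, Transitions):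
--     # Single pass: build the room dict once, then group matching transitions by room.
--     inv = {room: [] for room in Rooms}
--     for (src, label), items in Transitions.items():
--         if src in inv and 'take' in label:
--             inv[src].append(items[0])
--     return inv
-- ===== Notes on version B (the rewrite author's own statement) =====
-- stated objective: faster
-- what changed: Replaces A's per-room rescan of the whole transition dict (and its per-match dict lookup Transitions[transition]) by one pass over the transition items grouping into a dict keyed by room.
import Mathlib
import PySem

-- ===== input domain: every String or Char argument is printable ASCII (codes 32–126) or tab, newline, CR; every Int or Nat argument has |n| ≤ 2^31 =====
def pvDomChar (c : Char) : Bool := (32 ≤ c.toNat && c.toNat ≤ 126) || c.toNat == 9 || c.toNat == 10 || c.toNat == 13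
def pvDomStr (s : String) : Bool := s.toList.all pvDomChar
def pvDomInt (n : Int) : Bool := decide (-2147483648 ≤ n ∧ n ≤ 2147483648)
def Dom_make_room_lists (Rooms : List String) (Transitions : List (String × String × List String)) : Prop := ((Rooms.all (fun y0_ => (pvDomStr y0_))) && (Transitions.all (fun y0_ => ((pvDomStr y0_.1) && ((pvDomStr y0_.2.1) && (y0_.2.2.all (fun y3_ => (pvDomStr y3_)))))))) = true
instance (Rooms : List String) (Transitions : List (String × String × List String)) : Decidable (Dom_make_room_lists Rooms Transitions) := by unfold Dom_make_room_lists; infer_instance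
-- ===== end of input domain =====

-- B replaces A's per-room rescan of all transitions by one grouping pass over the transition items.

-- ===== PORT A =====
-- Python dict lookup Transitions[transition] (the key (l, lbl) was iterated from the dict, so KeyError is impossible)
def lookupTake (Transitions : List (String × String × List String)) (l lbl : String) : List String :=
  ((Transitions.find? (fun u => u.1 == l && u.2.1 == lbl)).map (fun u => u.2.2)).getD []

def make_room_lists (Rooms : List String) (Transitions : List (String × String × List String)) : List (String × List String) :=
  (Rooms.foldl (fun d room =>
    Transitions.foldl (fun d t =>
      if t.1 == room && PySem.Str.isIn "take" t.2.1 then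
        -- Room_inventory[room].append(Transitions[transition][0]); [0] of an empty item list raises IndexError, excluded by Pre_
        d.modify room [] (fun l => l ++ [((PySem.List.pyGet? (lookupTake Transitions t.1 t.2.1) 0).getD "")])
      else d) (d.insert room ([] : List String)))
    (PySem.Dict.empty : PySem.Dict String (List String))).items

-- ===== PORT B =====
def make_room_lists_alt (Rooms : List String) (Transitions : List (String × String × List String)) : List (String × List String) :=
  let inv := Rooms.foldl (fun d room => d.insert room ([] : List String))
    (PySem.Dict.empty : PySem.Dict String (List String))
  (Transitions.foldl (fun d t =>
    if d.contains t.1 && PySem.Str.isIn "take" t.2.1 then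
      -- inv[src].append(items[0]); items[0] of an empty list raises IndexError, excluded by Pre_
      d.modify t.1 [] (fun l => l ++ [((PySem.List.pyGet? t.2.2 0).getD "")])
    else d) inv).items

-- ===== PRECONDITION & SPEC =====
-- Pre_ excludes (i) association lists with a duplicated (room, label) key — the Python parameter is a dict,
-- which cannot carry duplicate keys, so no Python input is excluded — and (ii) inputs where a transition
-- from a listed room with 'take' in its label has an empty item list: there A (and B) raises IndexError.
def Pre_make_room_lists (Rooms : List String) (Transitions : List (String × String × List String)) : Prop :=
  (Transitions.map (fun t => (t.1, t.2.1))).Nodup ∧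
  ∀ t ∈ Transitions, t.1 ∈ Rooms → PySem.Str.isIn "take" t.2.1 = true → t.2.2 ≠ []
instance (Rooms : List String) (Transitions : List (String × String × List String)) : Decidable (Pre_make_room_lists Rooms Transitions) := by unfold Pre_make_room_lists; infer_instance

def pvWitness_make_room_lists : List String × (List (String × String × List String)) :=
  (["hall", "cave"], [("hall", "take key", ["key"]), ("cave", "go north", ["x"]), ("yard", "take axe", [])])

def Spec_make_room_lists (Rooms : List String) (Transitions : List (String × String × List String)) (out : List (String × List String)) : Prop := out = make_room_lists_alt Rooms Transitions
instance (Rooms : List String) (Transitions : List (String × String × List String)) (out : List (String × List String)) : Decidable (Spec_make_room_lists Rooms Transitions out) := by unfold Spec_make_room_lists; infer_instance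

-- ===== CLAIM (what is proved, stated in full; the proofs are below) =====
def Claim_equal_make_room_lists : Prop := ∀ (Rooms : List String) (Transitions : List (String × String × List String)), Dom_make_room_lists Rooms Transitions → Pre_make_room_lists Rooms Transitions → Spec_make_room_lists Rooms Transitions (make_room_lists Rooms Transitions)

-- ===== LEMMAS AND PROOFS =====

-- In a duplicate-free association list, looking a member's key up finds that member.
theorem find?_key_self (ts : List (String × String × List String))
    (t : String × String × List String) (ht : t ∈ ts)
    (hnd : (ts.map (fun u => (u.1, u.2.1))).Nodup) :
    ts.find? (fun u => u.1 == t.1 && u.2.1 == t.2.1) = some t := by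
  induction ts with
  | nil => cases ht
  | cons u us ih =>
      rw [List.map_cons] at hnd
      have hnd' := List.nodup_cons.1 hnd
      by_cases hm : (u.1 == t.1 && u.2.1 == t.2.1) = true
      · simp only [List.find?, hm]
        rcases List.mem_cons.1 ht with rfl | hmem
        · rfl
        · exfalso
          rw [Bool.and_eq_true] at hm
          have h1 : u.1 = t.1 := by simpa using hm.1
          have h2 : u.2.1 = t.2.1 := by simpa using hm.2
          exact hnd'.1 (by
            have : (t.1, t.2.1) ∈ us.map (fun u => (u.1, u.2.1)) :=
              List.mem_map.2 ⟨t, hmem, rfl⟩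
            simpa [h1, h2] using this)
      · have hm' : (u.1 == t.1 && u.2.1 == t.2.1) = false := by
          revert hm; cases (u.1 == t.1 && u.2.1 == t.2.1) <;> simp
        simp only [List.find?, hm']
        rcases List.mem_cons.1 ht with rfl | hmem
        · exact absurd (by simp) hm
        · exact ih hmem hnd'.2

-- Under unique keys, A's dict lookup returns the iterated entry's own item list.
theorem lookupTake_self (ts : List (String × String × List String))
    (t : String × String × List String) (ht : t ∈ ts)
    (hnd : (ts.map (fun u => (u.1, u.2.1))).Nodup) :
    lookupTake ts t.1 t.2.1 = t.2.2 := by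
  unfold lookupTake
  rw [find?_key_self ts t ht hnd]
  rfl

-- A's inner loop, with a generic appended value v t: its effect on getD.
theorem foldA_getD (ts : List (String × String × List String))
    (v : String × String × List String → String) (room : String)
    (d : PySem.Dict String (List String)) (k : String) :
    (ts.foldl (fun d t =>
      if t.1 == room && PySem.Str.isIn "take" t.2.1 then
        d.modify room [] (fun l => l ++ [v t])
      else d) d).getD k []
    = if k = room then
        d.getD k [] ++ (ts.filter (fun t => t.1 == room && PySem.Str.isIn "take" t.2.1)).map v
      else d.getD k [] := by
  induction ts generalizing d with
  | nil => simp
  | cons t ts ih =>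
      simp only [List.foldl_cons, List.filter_cons]
      by_cases hc : (t.1 == room && PySem.Str.isIn "take" t.2.1) = true
      · rw [if_pos hc, ih, if_pos hc, PySem.Dict.getD_modify]
        rw [Bool.and_eq_true] at hc
        obtain ⟨h1, h2⟩ := hc
        by_cases hk : k = room
        · subst hk; simp [List.append_assoc]
        · simp [hk]
      · rw [if_neg hc, ih, if_neg hc]

-- A's inner loop keeps the key list (it only modifies the already-present key room).
theorem foldA_keys (ts : List (String × String × List String))
    (v : String × String × List String → String) (room : String)
    (d : PySem.Dict String (List String)) (h : d.contains room = true) :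
    (ts.foldl (fun d t =>
      if t.1 == room && PySem.Str.isIn "take" t.2.1 then
        d.modify room [] (fun l => l ++ [v t])
      else d) d).keys = d.keys := by
  induction ts generalizing d with
  | nil => rfl
  | cons t ts ih =>
      simp only [List.foldl_cons]
      by_cases hc : (t.1 == room && PySem.Str.isIn "take" t.2.1) = true
      · rw [if_pos hc]
        have hk : (d.modify room [] (fun l => l ++ [v t])).keys = d.keys := by
          rw [PySem.Dict.keys_modify, PySem.Dict.keys_insert_of_contains _ _ h]
        rw [ih _ (by rw [PySem.Dict.contains_modify]; simp)]
        exact hk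
      · rw [if_neg hc]
        exact ih d h

-- A's outer loop: each listed room ends bound to its matching item list.
theorem A_getD (rooms : List String) (ts : List (String × String × List String))
    (v : String × String × List String → String)
    (d : PySem.Dict String (List String)) (k : String) :
    (rooms.foldl (fun d room =>
      ts.foldl (fun d t =>
        if t.1 == room && PySem.Str.isIn "take" t.2.1 then
          d.modify room [] (fun l => l ++ [v t])
        else d) (d.insert room ([] : List String))) d).getD k []
    = if k ∈ rooms then
        (ts.filter (fun t => t.1 == k && PySem.Str.isIn "take" t.2.1)).map v
      else d.getD k [] := by
  induction rooms generalizing d with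
  | nil => simp
  | cons r rs ih =>
      simp only [List.foldl_cons]
      rw [ih]
      by_cases hrs : k ∈ rs
      · simp [hrs, List.mem_cons]
      · rw [if_neg hrs, foldA_getD, PySem.Dict.getD_insert]
        by_cases hk : k = r
        · subst hk; simp [hrs]
        · simp [hk, hrs, List.mem_cons]

-- A's outer loop: its key list is the deduplicated room list.
theorem A_keys (rooms : List String) (ts : List (String × String × List String))
    (v : String × String × List String → String)
    (d : PySem.Dict String (List String)) :
    (rooms.foldl (fun d room =>
      ts.foldl (fun d t =>
        if t.1 == room && PySem.Str.isIn "take" t.2.1 then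
          d.modify room [] (fun l => l ++ [v t])
        else d) (d.insert room ([] : List String))) d).keys
    = PySem.Set.update d.keys rooms := by
  induction rooms generalizing d with
  | nil => simp [PySem.Set.update_nil]
  | cons r rs ih =>
      simp only [List.foldl_cons]
      rw [ih, foldA_keys _ _ _ _ (by rw [PySem.Dict.contains_insert]; simp),
        show PySem.Set.update d.keys (r :: rs) = PySem.Set.update (PySem.Set.add d.keys r) rs from rfl]
      congr 1
      by_cases hr : d.contains r = true
      · rw [PySem.Dict.keys_insert_of_contains _ _ hr]
        have : r ∈ d.keys := by
          have := hr; rw [PySem.Dict.contains_eq_decide_mem_keys] at this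
          exact of_decide_eq_true this
        show d.keys = PySem.Set.add d.keys r
        simp [PySem.Set.add, this]
      · have hr' : d.contains r = false := by
          revert hr; cases d.contains r <;> simp
        rw [PySem.Dict.keys_insert_of_not_contains _ _ hr']
        have : r ∉ d.keys := by
          intro hmem
          rw [PySem.Dict.contains_eq_decide_mem_keys] at hr'
          simp [hmem] at hr'
        show d.keys ++ [r] = PySem.Set.add d.keys r
        simp [PySem.Set.add, this]

-- One step of B's loop changes no key membership.
theorem stepB_contains (d : PySem.Dict String (List String))
    (t : String × String × List String) (x : String) :
    ((if d.contains t.1 && PySem.Str.isIn "take" t.2.1 then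
        d.modify t.1 [] (fun l => l ++ [((PySem.List.pyGet? t.2.2 0).getD "")])
      else d)).contains x = d.contains x := by
  by_cases hc : (d.contains t.1 && PySem.Str.isIn "take" t.2.1) = true
  · rw [if_pos hc, PySem.Dict.contains_modify]
    by_cases hx : x = t.1
    · subst hx; simp [(Bool.and_eq_true _ _ ▸ hc : _ ∧ _).1]
    · simp [hx]
  · rw [if_neg hc]

-- One step of B's loop keeps the key list.
theorem stepB_keys (d : PySem.Dict String (List String))
    (t : String × String × List String) :
    ((if d.contains t.1 && PySem.Str.isIn "take" t.2.1 then
        d.modify t.1 [] (fun l => l ++ [((PySem.List.pyGet? t.2.2 0).getD "")])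
      else d)).keys = d.keys := by
  by_cases hc : (d.contains t.1 && PySem.Str.isIn "take" t.2.1) = true
  · rw [if_pos hc, PySem.Dict.keys_modify,
      PySem.Dict.keys_insert_of_contains _ _ (Bool.and_eq_true _ _ ▸ hc : _ ∧ _).1]
  · rw [if_neg hc]

theorem foldB_keys (ts : List (String × String × List String))
    (d : PySem.Dict String (List String)) :
    (ts.foldl (fun d t =>
      if d.contains t.1 && PySem.Str.isIn "take" t.2.1 then
        d.modify t.1 [] (fun l => l ++ [((PySem.List.pyGet? t.2.2 0).getD "")])
      else d) d).keys = d.keys := by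
  induction ts generalizing d with
  | nil => rfl
  | cons t ts ih => rw [List.foldl_cons, ih, stepB_keys]

-- B's grouping loop: its effect on getD.
theorem foldB_getD (ts : List (String × String × List String))
    (d : PySem.Dict String (List String)) (k : String) :
    (ts.foldl (fun d t =>
      if d.contains t.1 && PySem.Str.isIn "take" t.2.1 then
        d.modify t.1 [] (fun l => l ++ [((PySem.List.pyGet? t.2.2 0).getD "")])
      else d) d).getD k []
    = d.getD k [] ++ (ts.filter (fun t =>
        d.contains t.1 && PySem.Str.isIn "take" t.2.1 && t.1 == k)).map
          (fun t => ((PySem.List.pyGet? t.2.2 0).getD "")) := by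
  induction ts generalizing d with
  | nil => simp
  | cons t ts ih =>
      simp only [List.foldl_cons, List.filter_cons]
      rw [ih]
      have hcont : ∀ u : String × String × List String,
          ((if d.contains t.1 && PySem.Str.isIn "take" t.2.1 then
              d.modify t.1 [] (fun l => l ++ [((PySem.List.pyGet? t.2.2 0).getD "")])
            else d)).contains u.1 = d.contains u.1 := fun u => stepB_contains d t u.1
      rw [List.filter_congr (fun u _ => by rw [hcont u])]
      by_cases hc : (d.contains t.1 && PySem.Str.isIn "take" t.2.1) = true
      · rw [if_pos hc, PySem.Dict.getD_modify]
        by_cases hk : k = t.1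
        · subst hk
          rw [if_pos rfl, if_pos (by rw [Bool.and_eq_true]; exact ⟨hc, by simp⟩)]
          simp [List.append_assoc]
        · have hfc : (d.contains t.1 && PySem.Str.isIn "take" t.2.1 && (t.1 == k)) = false := by
            have hne : (t.1 == k) = false := beq_eq_false_iff_ne.2 (fun h => hk h.symm)
            simp [hne]
          rw [if_neg hk, hfc]
          simp
      · have hc' : (d.contains t.1 && PySem.Str.isIn "take" t.2.1) = false := by
          revert hc; cases (d.contains t.1 && PySem.Str.isIn "take" t.2.1) <;> simp
        have hfc : (d.contains t.1 && PySem.Str.isIn "take" t.2.1 && (t.1 == k)) = false := by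
          rw [hc', Bool.false_and]
        rw [if_neg hc, hfc]
        simp

-- The initial room dict: every value is [].
theorem inv_getD (rooms : List String) (d : PySem.Dict String (List String))
    (k : String) (h : d.getD k [] = []) :
    (rooms.foldl (fun d room => d.insert room ([] : List String)) d).getD k [] = [] := by
  induction rooms generalizing d with
  | nil => exact h
  | cons r rs ih =>
      rw [List.foldl_cons]
      exact ih _ (by rw [PySem.Dict.getD_insert]; split_ifs <;> simp [h])

-- The initial room dict: key membership is membership in Rooms.
theorem inv_contains (rooms : List String) (k : String) :
    ((rooms.foldl (fun d room => d.insert room ([] : List String))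
      (PySem.Dict.empty : PySem.Dict String (List String)))).contains k
    = decide (k ∈ rooms) := by
  rw [PySem.Dict.contains_eq_decide_mem_keys]
  have hkeys : ((rooms.foldl (fun d room => d.insert room ([] : List String))
      (PySem.Dict.empty : PySem.Dict String (List String)))).keys
      = PySem.Set.update (PySem.Dict.empty : PySem.Dict String (List String)).keys rooms :=
    PySem.Dict.keys_foldl_insert rooms (fun _ _ => []) _
  rw [hkeys]
  by_cases h : k ∈ rooms
  · simp [PySem.Set.mem_update, h]
  · simp [PySem.Set.mem_update, h, PySem.Dict.keys_empty]

-- ===== VERDICT (by name: the statement is the Claim_ definition above) =====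
theorem make_room_lists_spec : Claim_equal_make_room_lists := by
  intro Rooms Transitions _ hpre
  obtain ⟨hnd, -⟩ := hpre
  unfold Spec_make_room_lists make_room_lists make_room_lists_alt
  set vA : String × String × List String → String :=
    fun t => ((PySem.List.pyGet? (lookupTake Transitions t.1 t.2.1) 0).getD "") with hvA
  set gB : String × String × List String → String :=
    fun t => ((PySem.List.pyGet? t.2.2 0).getD "") with hgB
  set DA := Rooms.foldl (fun d room =>
    Transitions.foldl (fun d t =>
      if t.1 == room && PySem.Str.isIn "take" t.2.1 then
        d.modify room [] (fun l => l ++ [vA t])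
      else d) (d.insert room ([] : List String)))
    (PySem.Dict.empty : PySem.Dict String (List String)) with hDA
  set inv := Rooms.foldl (fun d room => d.insert room ([] : List String))
    (PySem.Dict.empty : PySem.Dict String (List String)) with hinv
  set DB := Transitions.foldl (fun d t =>
    if d.contains t.1 && PySem.Str.isIn "take" t.2.1 then
      d.modify t.1 [] (fun l => l ++ [gB t])
    else d) inv with hDB
  show DA.items = DB.items
  have hkA : DA.keys = PySem.Set.update (PySem.Dict.empty : PySem.Dict String (List String)).keys Rooms := by
    rw [hDA]; exact A_keys Rooms Transitions vA _
  have hkI : inv.keys = PySem.Set.update (PySem.Dict.empty : PySem.Dict String (List String)).keys Rooms := by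
    rw [hinv]; exact PySem.Dict.keys_foldl_insert Rooms (fun _ _ => []) _
  have hkB : DB.keys = PySem.Set.update (PySem.Dict.empty : PySem.Dict String (List String)).keys Rooms := by
    rw [hDB, foldB_keys, hkI]
  have hnodup : DA.keys.Nodup := by
    rw [hkA, PySem.Dict.keys_empty]
    exact PySem.Set.nodup_update _ _ List.nodup_nil
  have hnodupB : DB.keys.Nodup := by rw [hkB, ← hkA]; exact hnodup
  rw [PySem.Dict.items_eq_map_keys DA hnodup ([] : List String),
      PySem.Dict.items_eq_map_keys DB hnodupB ([] : List String),
      hkA, hkB]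
  refine List.map_congr_left (fun k hk => ?_)
  have hkRooms : k ∈ Rooms := by
    rcases (PySem.Set.mem_update _ _ _).1 hk with h | h
    · simp [PySem.Dict.keys_empty] at h
    · exact h
  have hA : DA.getD k [] =
      (Transitions.filter (fun t => t.1 == k && PySem.Str.isIn "take" t.2.1)).map vA := by
    rw [hDA, A_getD, if_pos hkRooms]
  have hB : DB.getD k [] =
      (Transitions.filter (fun t =>
        inv.contains t.1 && PySem.Str.isIn "take" t.2.1 && t.1 == k)).map gB := by
    rw [hDB, foldB_getD, hinv, inv_getD Rooms _ k (PySem.Dict.getD_empty _ _)]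
    rfl
  rw [hA, hB]
  have hfilter : Transitions.filter (fun t =>
        inv.contains t.1 && PySem.Str.isIn "take" t.2.1 && t.1 == k)
      = Transitions.filter (fun t => t.1 == k && PySem.Str.isIn "take" t.2.1) := by
    refine List.filter_congr (fun t _ => ?_)
    rw [hinv, inv_contains]
    by_cases h1 : t.1 = k
    · subst h1; simp [hkRooms, Bool.and_comm]
    · have : (t.1 == k) = false := by simp [h1]
      simp [this]
  rw [hfilter]
  refine congrArg (fun l => (k, l)) ?_
  refine List.map_congr_left (fun t ht => ?_)
  rw [hvA, hgB]
  simp only []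
  rw [lookupTake_self Transitions t (List.mem_of_mem_filter ht) hnd]
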